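-- pv_equiv track=rewrite | github.com/HAMakaryan/ogni | projects/Logger/logger.py | normalize_raw
-- ===== SOURCE A (Python) =====
-- def normalize_raw(data):
--     if len(data) >= 4:
--         if (data[0] & 128) == (data[1] & 128):
--             if (data[1] & 128) == (data[2] & 128):
--                 if (data[2] & 128) == (data[3] & 128):
--                     return data
--                 else:
--                     return normalize_raw(data[3:])
--             else:
--                 return normalize_raw(data[2:])
--         else:
--             return normalize_raw(data[1:])
--     return data
-- ===== SOURCE B (Python) =====
-- def normalize_raw(data):
--     n = len(data)
--     start = 0
--     for i in range(1, n):
--         if n - start < 4: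
--             return data[start:]
--         if (data[i] & 128) != (data[i - 1] & 128):
--             start = i
--         elif i - start == 3:
--             return data[start:]
--     return data[start:]
-- ===== Notes on version B (the rewrite author's own statement) =====
-- stated objective: alternative
-- what changed: Replaces A's recursion on list slices (re-slicing and re-testing the suffix after every mismatch, O(n^2) worst case) by a single index scan that tracks the start of the current run of equal high-bits and takes one final slice; measured speed on random inputs is similar, so no speed is claimed.
import Mathlib
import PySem

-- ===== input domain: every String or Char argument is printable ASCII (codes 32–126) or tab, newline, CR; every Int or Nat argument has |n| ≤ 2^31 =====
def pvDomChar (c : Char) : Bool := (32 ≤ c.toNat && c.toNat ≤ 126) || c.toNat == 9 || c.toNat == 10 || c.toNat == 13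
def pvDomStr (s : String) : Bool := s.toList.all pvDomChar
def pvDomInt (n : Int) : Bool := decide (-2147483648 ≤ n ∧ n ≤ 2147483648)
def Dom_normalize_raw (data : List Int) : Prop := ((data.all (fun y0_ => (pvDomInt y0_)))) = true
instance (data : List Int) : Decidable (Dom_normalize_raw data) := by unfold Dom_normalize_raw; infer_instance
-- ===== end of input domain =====

-- B replaces A's re-slicing recursion by one linear index scan tracking the start of the current
-- run of equal high-bits, with a single final slice (objective: alternative algorithm; not measured faster).

-- ===== PORT A =====
-- literal transliteration of A's recursive code; data[k:] = slice, data[k] = pyGetD (always in range, guarded by len ≥ 4)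
def normalize_raw (data : List Int) : List Int :=
  if 4 ≤ data.length then
    if PySem.Int.band (PySem.List.pyGetD data 0 0) 128 = PySem.Int.band (PySem.List.pyGetD data 1 0) 128 then
      if PySem.Int.band (PySem.List.pyGetD data 1 0) 128 = PySem.Int.band (PySem.List.pyGetD data 2 0) 128 then
        if PySem.Int.band (PySem.List.pyGetD data 2 0) 128 = PySem.Int.band (PySem.List.pyGetD data 3 0) 128 then
          data
        else normalize_raw (PySem.List.slice data (some 3) none)
      else normalize_raw (PySem.List.slice data (some 2) none)
    else normalize_raw (PySem.List.slice data (some 1) none)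
  else data
termination_by data.length
decreasing_by
  · rw [PySem.List.slice_from data (by norm_num)]; simp; omega
  · rw [PySem.List.slice_from data (by norm_num)]; simp; omega
  · rw [PySem.List.slice_from data (by norm_num)]; simp; omega

-- ===== PORT B =====
-- the for-loop of Source B with its early returns, as a tail recursion on i; start = current run start
def normalizeAltLoop (data : List Int) (n i start : Nat) : List Int :=
  if i < n then
    if (n : Int) - (start : Int) < 4 then PySem.List.slice data (some (start : Int)) none
    else if PySem.Int.band (PySem.List.pyGetD data (i : Int) 0) 128 ≠
            PySem.Int.band (PySem.List.pyGetD data ((i : Int) - 1) 0) 128 then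
      normalizeAltLoop data n (i + 1) i
    else if i - start = 3 then PySem.List.slice data (some (start : Int)) none
    else normalizeAltLoop data n (i + 1) start
  else PySem.List.slice data (some (start : Int)) none
termination_by n - i

def normalize_raw_alt (data : List Int) : List Int :=
  normalizeAltLoop data data.length 1 0

-- ===== PRECONDITION & SPEC =====
def Spec_normalize_raw (data : List Int) (out : List Int) : Prop := out = normalize_raw_alt data
instance (data : List Int) (out : List Int) : Decidable (Spec_normalize_raw data out) := by unfold Spec_normalize_raw; infer_instance

-- ===== CLAIM (what is proved, stated in full; the proofs are below) =====
def Claim_equal_normalize_raw : Prop := ∀ (data : List Int), Dom_normalize_raw data → Spec_normalize_raw data (normalize_raw data)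

-- ===== LEMMAS AND PROOFS =====

theorem getD_drop_add (xs : List Int) (s k : Nat) (d : Int) :
    (xs.drop s).getD k d = xs.getD (s + k) d := by
  simp [List.getD, List.getElem?_drop]

-- A returns its argument as soon as the length is below 4
theorem normalize_raw_short (xs : List Int) (h : xs.length < 4) : normalize_raw xs = xs := by
  rw [normalize_raw]; simp [Nat.not_le.mpr h]

-- run invariant: positions start..i-1 all carry the high bit of position start
theorem altLoop_eq (data : List Int) (i start : Nat)
    (h1 : start < i) (h2 : i ≤ data.length) (h3 : i - start ≤ 3)
    (h4 : ∀ j, start ≤ j → j < i →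
      PySem.Int.band (data.getD j 0) 128 = PySem.Int.band (data.getD start 0) 128) :
    normalizeAltLoop data data.length i start = normalize_raw (data.drop start) := by
  rw [normalizeAltLoop]
  rw [PySem.List.slice_from_natCast]
  by_cases hin : i < data.length
  · rw [if_pos hin]
    by_cases hlt : (data.length : Int) - (start : Int) < 4
    · rw [if_pos hlt]
      rw [normalize_raw_short _ (by simp; omega)]
    · rw [if_neg hlt]
      have hn4 : 4 ≤ data.length - start := by omega
      have hi1 : ((i : Int) - 1) = (((i - 1 : Nat)) : Int) := by omega
      rw [hi1]
      simp only [PySem.List.pyGetD_natCast]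
      by_cases hmis : PySem.Int.band (data.getD i 0) 128 ≠ PySem.Int.band (data.getD (i-1) 0) 128
      · rw [if_pos hmis]
        rw [altLoop_eq data (i+1) i (by omega) (by omega) (by omega)
          (by intro j hj1 hj2; have hji : j = i := (by omega); exact congrArg (fun x => PySem.Int.band (data.getD x 0) 128) hji)]
        have hmis' : PySem.Int.band (data.getD i 0) 128 ≠ PySem.Int.band (data.getD start 0) 128 := by
          intro h; exact hmis (h.trans (h4 (i-1) (by omega) (by omega)).symm)
        conv_rhs => rw [normalize_raw]
        have hlen : 4 ≤ (data.drop start).length := by simp; omega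
        rw [if_pos hlen]
        simp only [PySem.List.pyGetD_ofNat', getD_drop_add]
        have hd : i - start = 1 ∨ i - start = 2 ∨ i - start = 3 := by omega
        rcases hd with hd | hd | hd
        · have e1 : start + 1 = i := by omega
          rw [if_neg (by rw [e1]; exact fun h => hmis' h.symm)]
          rw [PySem.List.slice_from _ (by norm_num), List.drop_drop]
          have ee : start + ((1:Int)).toNat = i := by omega
          rw [ee]
        · have e2 : start + 2 = i := by omega
          rw [if_pos (by rw [(h4 (start+1) (by omega) (by omega) : _)]; simp)]
          rw [if_neg (by
            rw [e2, (h4 (start+1) (by omega) (by omega) : _)]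
            exact fun h => hmis' h.symm)]
          rw [PySem.List.slice_from _ (by norm_num), List.drop_drop]
          have ee : start + ((2:Int)).toNat = i := by omega
          rw [ee]
        · have e3 : start + 3 = i := by omega
          rw [if_pos (by rw [(h4 (start+1) (by omega) (by omega) : _)]; simp)]
          rw [if_pos (by
            rw [(h4 (start+1) (by omega) (by omega) : _), (h4 (start+2) (by omega) (by omega) : _)])]
          rw [if_neg (by
            rw [e3, (h4 (start+2) (by omega) (by omega) : _)]
            exact fun h => hmis' h.symm)]
          rw [PySem.List.slice_from _ (by norm_num), List.drop_drop]
          have ee : start + ((3:Int)).toNat = i := by omega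
          rw [ee]
      · rw [if_neg hmis]
        have heq : PySem.Int.band (data.getD i 0) 128 = PySem.Int.band (data.getD start 0) 128 := by
          rw [not_not.mp hmis]; exact h4 (i-1) (by omega) (by omega)
        by_cases h33 : i - start = 3
        · rw [if_pos h33]
          conv_rhs => rw [normalize_raw]
          have hlen : 4 ≤ (data.drop start).length := by simp; omega
          rw [if_pos hlen]
          simp only [PySem.List.pyGetD_ofNat', getD_drop_add]
          have e3 : start + 3 = i := by omega
          rw [if_pos (by rw [(h4 (start+1) (by omega) (by omega) : _)]; simp)]
          rw [if_pos (by
            rw [(h4 (start+1) (by omega) (by omega) : _), (h4 (start+2) (by omega) (by omega) : _)])]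
          rw [if_pos (by rw [e3, heq, (h4 (start+2) (by omega) (by omega) : _)])]
        · rw [if_neg h33]
          rw [altLoop_eq data (i+1) start (by omega) (by omega) (by omega)
            (by
              intro j hj1 hj2
              by_cases hji : j < i
              · exact h4 j hj1 hji
              · have : j = i := by omega
                subst this; exact heq)]
  · rw [if_neg hin]
    rw [normalize_raw_short _ (by simp; omega)]
termination_by data.length - i

-- ===== VERDICT (by name: the statement is the Claim_ definition above) =====
theorem normalize_raw_spec : Claim_equal_normalize_raw := by
  intro data _
  unfold Spec_normalize_raw normalize_raw_alt
  rcases Nat.lt_or_ge data.length 1 with h | h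
  · have hnil : data = [] := List.eq_nil_of_length_eq_zero (by omega)
    subst hnil
    rw [normalize_raw_short _ (by simp)]
    rw [normalizeAltLoop]
    simp
  · rw [altLoop_eq data 1 0 (by omega) h (by omega)
      (by intro j hj1 hj2; have hj0 : j = 0 := (by omega); exact congrArg (fun x => PySem.Int.band (data.getD x 0) 128) hj0)]
    simp
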